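-- pv_equiv track=rewrite | github.com/aman-bcalm/Scaler-Problems | Primer/CollectResources.py | solve
-- ===== SOURCE A (Python) =====
-- def solve(A, B):
--     row = len(A)
--     col = len(A[0])
--
--     rs = []
--     #row wise sum
--     for i in range(0,len(A)):
--
--         row_sum = 0
--
--
--         for j in range(0,len(A[0])):
--             row_sum = row_sum + max(A[i][j],  B[i][j])
--
--
--         rs.append(row_sum)
--
--
--     cs = []
--     #columns wise sum
--     for i in range(0,len(A[0])):
--
--         col_sum = 0
--
--
--         for j in range(0,len(A)):
--             col_sum = col_sum + max(A[j][i], B[j][i])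
--
--
--
--         cs.append(col_sum)
--
--     rss, css = 0, 0
--     for i in range(0, len(rs)):
--         rss += rs[i]
--
--
--     for i in range(0,len(cs)):
--         css += cs[i]
--
--
--     result = max(rss,css)
--     return result
-- ===== SOURCE B (Python) =====
-- def solve(A, B):
--     row = len(A)
--     col = len(A[0])
--     total = 0
--     for i in range(row):
--         for j in range(col):
--             total += max(A[i][j], B[i][j])
--     return total
-- ===== Notes on version B (the rewrite author's own statement) =====
-- stated objective: faster
-- what changed: B replaces A's four loops (building row-sum and column-sum lists, reducing each, taking max of the two identical totals) with one nested loop accumulating sum(max(A[i][j],B[i][j])) directly, since the row-wise and column-wise grand totals are the same number; this halves the element visits and drops the intermediate lists.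
import Mathlib
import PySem

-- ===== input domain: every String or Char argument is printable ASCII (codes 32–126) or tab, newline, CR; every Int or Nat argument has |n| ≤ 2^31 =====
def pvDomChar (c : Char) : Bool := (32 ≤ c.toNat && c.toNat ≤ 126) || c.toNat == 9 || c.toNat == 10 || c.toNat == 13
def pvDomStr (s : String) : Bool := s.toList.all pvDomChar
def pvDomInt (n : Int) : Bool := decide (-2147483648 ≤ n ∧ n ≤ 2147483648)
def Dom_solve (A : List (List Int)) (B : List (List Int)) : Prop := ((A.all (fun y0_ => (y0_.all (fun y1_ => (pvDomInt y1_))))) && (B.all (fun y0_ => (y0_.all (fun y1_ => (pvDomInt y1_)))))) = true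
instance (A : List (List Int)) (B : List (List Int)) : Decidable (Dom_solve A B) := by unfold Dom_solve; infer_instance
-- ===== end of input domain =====

-- B collapses A's two passes and two reduction loops into one nested accumulation loop (the
-- row-wise and column-wise grand totals are the same number, so max(rss, css) = the plain sum).

-- X[i][j] as both Pythons index it; the defaults are never reached inside Pre_solve
def idx2 (X : List (List Int)) (i j : Int) : Int :=
  PySem.List.pyGetD (PySem.List.pyGetD X i []) j 0

-- ===== PORT A =====
def solve (A : List (List Int)) (B : List (List Int)) : Int :=
  let row : Int := (A.length : Int)
  let col : Int := (((PySem.List.pyGetD A 0 []).length : Nat) : Int)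
  let rs : List Int :=
    (PySem.List.pyRange 0 row).foldl (fun rs i =>
      rs ++ [(PySem.List.pyRange 0 col).foldl
               (fun s j => s + max (idx2 A i j) (idx2 B i j)) 0]) []
  let cs : List Int :=
    (PySem.List.pyRange 0 col).foldl (fun cs i =>
      cs ++ [(PySem.List.pyRange 0 row).foldl
               (fun s j => s + max (idx2 A j i) (idx2 B j i)) 0]) []
  let rss : Int :=
    (PySem.List.pyRange 0 ((rs.length : Nat) : Int)).foldl
      (fun s i => s + PySem.List.pyGetD rs i 0) 0
  let css : Int :=
    (PySem.List.pyRange 0 ((cs.length : Nat) : Int)).foldl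
      (fun s i => s + PySem.List.pyGetD cs i 0) 0
  max rss css

-- ===== PORT B =====
def solve_alt (A : List (List Int)) (B : List (List Int)) : Int :=
  let row : Int := (A.length : Int)
  let col : Int := (((PySem.List.pyGetD A 0 []).length : Nat) : Int)
  (PySem.List.pyRange 0 row).foldl (fun t i =>
    (PySem.List.pyRange 0 col).foldl
      (fun t j => t + max (idx2 A i j) (idx2 B i j)) t) 0

-- ===== PRECONDITION & SPEC =====
-- Pre_ excludes exactly the inputs where the Pythons raise IndexError: empty A (len(A[0])),
-- or — when len(A[0]) > 0, so that elements are actually indexed — B shorter than A, or a row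
-- of A or of B (among B's first len(A) rows) shorter than len(A[0]).
def Pre_solve (A : List (List Int)) (B : List (List Int)) : Prop :=
  A ≠ [] ∧ ((A.headD []).length = 0 ∨
    (A.length ≤ B.length ∧
     (∀ r ∈ A, (A.headD []).length ≤ r.length) ∧
     (∀ r ∈ B.take A.length, (A.headD []).length ≤ r.length)))
instance (A : List (List Int)) (B : List (List Int)) : Decidable (Pre_solve A B) := by
  unfold Pre_solve; infer_instance

def pvWitness_solve : List (List Int) × List (List Int) := ([[1, 2], [3, 4]], [[4, 3], [2, 1]])

def Spec_solve (A : List (List Int)) (B : List (List Int)) (out : Int) : Prop := out = solve_alt A B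
instance (A : List (List Int)) (B : List (List Int)) (out : Int) : Decidable (Spec_solve A B out) := by unfold Spec_solve; infer_instance

-- ===== CLAIM (what is proved, stated in full; the proofs are below) =====
def Claim_equal_solve : Prop := ∀ (A : List (List Int)) (B : List (List Int)), Dom_solve A B → Pre_solve A B → Spec_solve A B (solve A B)

-- ===== LEMMAS AND PROOFS =====

-- swapping the order of a double sum over ranges
lemma sum_map_sum_comm (m n : Nat) (f : Nat → Nat → Int) :
    ((List.range m).map (fun i => ((List.range n).map (fun j => f i j)).sum)).sum
    = ((List.range n).map (fun j => ((List.range m).map (fun i => f i j)).sum)).sum := by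
  induction m with
  | zero => simp
  | succ m ih =>
      rw [List.range_succ]
      simp only [List.map_append, List.sum_append, List.map_cons, List.map_nil,
        List.sum_cons, List.sum_nil, add_zero, ih]
      rw [← PySem.List.sum_map_add_int]

-- a sum-accumulating fold over pyRange 0 n is the sum over List.range n
lemma foldl_pyRange_sum (n : Nat) (g : Int → Int) (a : Int) :
    (PySem.List.pyRange 0 ((n : Nat) : Int)).foldl (fun s i => s + g i) a
    = a + ((List.range n).map (fun i : Nat => g (i : Int))).sum := by
  rw [PySem.List.pyRange_zero_natCast, PySem.List.foldl_add, List.map_map]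
  simp [Function.comp_def]

-- the reduction loop 'for i in range(len(l)): s += l[i]' is l.sum
lemma foldl_pyRange_getD_sum (l : List Int) :
    (PySem.List.pyRange 0 ((l.length : Nat) : Int)).foldl
      (fun s i => s + PySem.List.pyGetD l i 0) 0 = l.sum := by
  have h := PySem.List.foldl_pyRange_pyGetD l 0 (fun s x => s + x) 0 (a := 0) le_rfl
  simp only [Int.toNat_zero, List.drop_zero] at h
  rw [List.sum_eq_foldl]
  exact h

-- ===== VERDICT (by name: the statement is the Claim_ definition above) =====
theorem solve_spec : Claim_equal_solve := by
  intro A B _ _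
  show solve A B = solve_alt A B
  unfold solve solve_alt
  set m := A.length with hm
  set n := (PySem.List.pyGetD A 0 []).length with hn
  set f : Int → Int → Int := fun i j => max (idx2 A i j) (idx2 B i j) with hf
  simp only [PySem.List.foldl_append_singleton_eq_map, List.nil_append]
  rw [foldl_pyRange_getD_sum, foldl_pyRange_getD_sum]
  -- B's nested loop is the double sum
  have hB : (PySem.List.pyRange 0 ((m : Nat) : Int)).foldl
      (fun t i => (PySem.List.pyRange 0 ((n : Nat) : Int)).foldl (fun t j => t + f i j) t) 0
      = ((List.range m).map (fun i : Nat =>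
          ((List.range n).map (fun j : Nat => f (i : Int) (j : Int))).sum)).sum := by
    have hinner : ∀ (t i : Int), i ∈ PySem.List.pyRange 0 ((m : Nat) : Int) →
        (PySem.List.pyRange 0 ((n : Nat) : Int)).foldl (fun t j => t + f i j) t
        = t + ((List.range n).map (fun j : Nat => f i (j : Int))).sum :=
      fun t i _ => foldl_pyRange_sum n (f i) t
    rw [PySem.List.foldl_congr_mem (PySem.List.pyRange 0 ((m : Nat) : Int))
      (fun t i => (PySem.List.pyRange 0 ((n : Nat) : Int)).foldl (fun t j => t + f i j) t)
      (fun t i => t + ((List.range n).map (fun j : Nat => f i (j : Int))).sum) 0 hinner]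
    rw [PySem.List.pyRange_zero_natCast, PySem.List.foldl_add, List.map_map]
    simp [Function.comp_def]
  rw [hB]
  -- A's rs / cs sums are the two double sums
  have hlist : ∀ (k l : Nat) (g : Int → Int → Int),
      ((PySem.List.pyRange 0 ((k : Nat) : Int)).map (fun i =>
        (PySem.List.pyRange 0 ((l : Nat) : Int)).foldl (fun s j => s + g i j) 0)).sum
      = ((List.range k).map (fun i : Nat =>
          ((List.range l).map (fun j : Nat => g (i : Int) (j : Int))).sum)).sum := by
    intro k l g
    have hcol : (fun i : Int => (PySem.List.pyRange 0 ((l : Nat) : Int)).foldl (fun s j => s + g i j) 0)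
        = fun i : Int => ((List.range l).map (fun j : Nat => g i (j : Int))).sum :=
      funext fun i => by simpa using foldl_pyRange_sum l (g i) 0
    rw [hcol, PySem.List.pyRange_zero_natCast, List.map_map]
    simp [Function.comp_def]
  rw [hlist, hlist]
  rw [sum_map_sum_comm n m (fun i j => f (j : Int) (i : Int))]
  exact max_self _
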